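-- pv_equiv track=rewrite | github.com/pcd1193182/color_wheel | color_wheel.py | supersample
-- ===== SOURCE A (Python) =====
-- def supersample(img, outsize, ss_rate):
--     out_img = [[[0,0,0,0] for i in range(outsize)] for i in range(outsize)]
--     ss2 = ss_rate * ss_rate
--     for x in range(outsize):
--         for y in range(outsize):
--             r = 0
--             g = 0
--             b = 0
--             a = 0
--             for xi in range(ss_rate):
--                 for yi in range(ss_rate):
--                     pixel = img[y * ss_rate + yi][x * ss_rate + xi]
--                     r = r + pixel[0]
--                     g = g + pixel[1]
--                     b = b + pixel[2]
--                     a = a + pixel[3]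
--             out_img[y][x] = [r // ss2, g // ss2, b // ss2, a // ss2]
--     return out_img
-- ===== SOURCE B (Python) =====
-- def supersample(img, outsize, ss_rate):
--     # Separable box reduction: first collapse each band of ss_rate rows into one
--     # combined row of per-column channel sums, then reduce that row horizontally.
--     ss2 = ss_rate * ss_rate
--     n = outsize * ss_rate
--     out = []
--     for y in range(outsize):
--         combined = [
--             [sum(img[y * ss_rate + yi][xx][c] for yi in range(ss_rate)) for c in range(4)]
--             for xx in range(n)
--         ]
--         out.append([
--             [sum(combined[x * ss_rate + xi][c] for xi in range(ss_rate)) // ss2 for c in range(4)]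
--             for x in range(outsize)
--         ])
--     return out
-- ===== Notes on version B (the rewrite author's own statement) =====
-- stated objective: alternative
-- what changed: A gathers each output block with four nested loops mutating a preallocated column-major matrix; B is a separable two-phase reduction that first collapses each band of ss_rate rows into one combined row of per-column channel sums and then reduces that row horizontally per block, building the output rows directly.
import Mathlib
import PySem

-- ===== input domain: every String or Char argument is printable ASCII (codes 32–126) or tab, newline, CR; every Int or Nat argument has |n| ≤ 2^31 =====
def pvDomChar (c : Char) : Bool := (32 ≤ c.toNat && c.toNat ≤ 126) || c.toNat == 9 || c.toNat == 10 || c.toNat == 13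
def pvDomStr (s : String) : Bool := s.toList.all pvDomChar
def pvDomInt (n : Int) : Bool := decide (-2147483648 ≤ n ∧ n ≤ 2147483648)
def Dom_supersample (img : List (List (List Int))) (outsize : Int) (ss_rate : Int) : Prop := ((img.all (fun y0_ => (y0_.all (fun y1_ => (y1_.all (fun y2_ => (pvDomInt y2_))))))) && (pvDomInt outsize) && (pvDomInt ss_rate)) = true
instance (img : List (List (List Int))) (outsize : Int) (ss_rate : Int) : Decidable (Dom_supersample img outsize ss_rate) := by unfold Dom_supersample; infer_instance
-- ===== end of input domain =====

-- B re-implements the box downsample as a separable two-phase reduction (each band of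
-- ss_rate rows is first collapsed into one combined row of per-column channel sums,
-- which is then reduced horizontally); same exact values — objective: alternative.

-- ===== PORT A =====
def supersample (img : List (List (List Int))) (outsize : Int) (ss_rate : Int) : List (List (List Int)) :=
  let out_img : List (List (List Int)) :=
    (PySem.List.pyRange 0 outsize 1).map (fun _ =>
      (PySem.List.pyRange 0 outsize 1).map (fun _ => ([0, 0, 0, 0] : List Int)))
  let ss2 := ss_rate * ss_rate
  (PySem.List.pyRange 0 outsize 1).foldl (fun out x =>
    (PySem.List.pyRange 0 outsize 1).foldl (fun out y =>
      let s : Int × Int × Int × Int :=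
        (PySem.List.pyRange 0 ss_rate 1).foldl (fun s xi =>
          (PySem.List.pyRange 0 ss_rate 1).foldl (fun (s : Int × Int × Int × Int) yi =>
            let pixel : List Int :=
              PySem.List.pyGetD (PySem.List.pyGetD img (y * ss_rate + yi) []) (x * ss_rate + xi) []
            (s.1 + PySem.List.pyGetD pixel 0 0,
             s.2.1 + PySem.List.pyGetD pixel 1 0,
             s.2.2.1 + PySem.List.pyGetD pixel 2 0,
             s.2.2.2 + PySem.List.pyGetD pixel 3 0)) s) ((0, 0, 0, 0) : Int × Int × Int × Int)
      out.set y.toNat ((out.getD y.toNat []).set x.toNat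
        [PySem.Int.floordiv s.1 ss2, PySem.Int.floordiv s.2.1 ss2,
         PySem.Int.floordiv s.2.2.1 ss2, PySem.Int.floordiv s.2.2.2 ss2])) out) out_img

-- ===== PORT B =====
def supersample_alt (img : List (List (List Int))) (outsize : Int) (ss_rate : Int) : List (List (List Int)) :=
  let ss2 := ss_rate * ss_rate
  let n := outsize * ss_rate
  (PySem.List.pyRange 0 outsize 1).foldl (fun out y =>
    let combined : List (List Int) :=
      (PySem.List.pyRange 0 n 1).map (fun xx =>
        (PySem.List.pyRange 0 4 1).map (fun c =>
          (PySem.List.pyRange 0 ss_rate 1).foldl (fun s yi =>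
            s + PySem.List.pyGetD
                  (PySem.List.pyGetD (PySem.List.pyGetD img (y * ss_rate + yi) []) xx []) c 0) 0))
    out ++ [(PySem.List.pyRange 0 outsize 1).map (fun x =>
      (PySem.List.pyRange 0 4 1).map (fun c =>
        PySem.Int.floordiv
          ((PySem.List.pyRange 0 ss_rate 1).foldl (fun s xi =>
            s + PySem.List.pyGetD (PySem.List.pyGetD combined (x * ss_rate + xi) []) c 0) 0)
          ss2))]) []

-- ===== PRECONDITION & SPEC =====
-- Pre_ excludes exactly the inputs where the Python A raises: ZeroDivisionError when
-- outsize > 0 and ss_rate = 0, and IndexError when some read row/column/channel is missing.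
def Pre_supersample (img : List (List (List Int))) (outsize : Int) (ss_rate : Int) : Prop :=
  outsize ≤ 0 ∨ ss_rate < 0 ∨
    (0 < ss_rate ∧ (outsize * ss_rate).toNat ≤ img.length ∧
      ∀ row ∈ img.take (outsize * ss_rate).toNat,
        (outsize * ss_rate).toNat ≤ row.length ∧
          ∀ px ∈ row.take (outsize * ss_rate).toNat, 4 ≤ px.length)
instance (img : List (List (List Int))) (outsize : Int) (ss_rate : Int) : Decidable (Pre_supersample img outsize ss_rate) := by unfold Pre_supersample; infer_instance

def pvWitness_supersample : List (List (List Int)) × Int × Int :=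
  ([[[1, 2, 3, 4], [5, 6, 7, 8]], [[9, 10, 11, 12], [0, 1, 2, 3]]], 2, 1)

def Spec_supersample (img : List (List (List Int))) (outsize : Int) (ss_rate : Int) (out : List (List (List Int))) : Prop := out = supersample_alt img outsize ss_rate
instance (img : List (List (List Int))) (outsize : Int) (ss_rate : Int) (out : List (List (List Int))) : Decidable (Spec_supersample img outsize ss_rate out) := by unfold Spec_supersample; infer_instance

-- ===== CLAIM (what is proved, stated in full; the proofs are below) =====
def Claim_equal_supersample : Prop := ∀ (img : List (List (List Int))) (outsize : Int) (ss_rate : Int), Dom_supersample img outsize ss_rate → Pre_supersample img outsize ss_rate → Spec_supersample img outsize ss_rate (supersample img outsize ss_rate)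

-- ===== LEMMAS AND PROOFS =====

-- the channel value read at img[r][c][ch] (0 default, as both ports read it)
def pvP (img : List (List (List Int))) (r c ch : Int) : Int :=
  PySem.List.pyGetD (PySem.List.pyGetD (PySem.List.pyGetD img r []) c []) ch 0

-- the block sum of channel ch for output cell (y, x)
def pvS (img : List (List (List Int))) (ss y x ch : Int) : Int :=
  ((PySem.List.pyRange 0 ss 1).map (fun xi =>
    ((PySem.List.pyRange 0 ss 1).map (fun yi =>
      pvP img (y * ss + yi) (x * ss + xi) ch)).sum)).sum

-- the output pixel at cell (y, x)
def pvVal (img : List (List (List Int))) (ss y x : Int) : List Int :=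
  (PySem.List.pyRange 0 4 1).map (fun c => PySem.Int.floordiv (pvS img ss y x c) (ss * ss))

lemma pyR (m : Int) :
    PySem.List.pyRange 0 m 1 = List.map (fun k : Nat => (k : Int)) (List.range m.toNat) := by
  rw [PySem.List.pyRange_one]; simp only [zero_add, sub_zero]

lemma pyRange4 : PySem.List.pyRange 0 4 1 = [0, 1, 2, 3] := by decide

lemma pvVal_eq_list (img : List (List (List Int))) (ss y x : Int) :
    pvVal img ss y x =
      [PySem.Int.floordiv (pvS img ss y x 0) (ss * ss),
       PySem.Int.floordiv (pvS img ss y x 1) (ss * ss),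
       PySem.Int.floordiv (pvS img ss y x 2) (ss * ss),
       PySem.Int.floordiv (pvS img ss y x 3) (ss * ss)] := by
  rw [pvVal, pyRange4]; rfl

lemma foldl_quad (l : List Int) (f0 f1 f2 f3 : Int → Int) (s : Int × Int × Int × Int) :
    l.foldl (fun s e => (s.1 + f0 e, s.2.1 + f1 e, s.2.2.1 + f2 e, s.2.2.2 + f3 e)) s
      = (s.1 + (l.map f0).sum, s.2.1 + (l.map f1).sum,
         s.2.2.1 + (l.map f2).sum, s.2.2.2 + (l.map f3).sum) := by
  induction l generalizing s with
  | nil => simp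
  | cons e t ih => simp [ih, add_assoc]

lemma A_cell (img : List (List (List Int))) (ss y x : Int) :
    (PySem.List.pyRange 0 ss 1).foldl (fun s xi =>
      (PySem.List.pyRange 0 ss 1).foldl (fun (s : Int × Int × Int × Int) yi =>
        (s.1 + PySem.List.pyGetD (PySem.List.pyGetD (PySem.List.pyGetD img (y * ss + yi) []) (x * ss + xi) []) 0 0,
         s.2.1 + PySem.List.pyGetD (PySem.List.pyGetD (PySem.List.pyGetD img (y * ss + yi) []) (x * ss + xi) []) 1 0,
         s.2.2.1 + PySem.List.pyGetD (PySem.List.pyGetD (PySem.List.pyGetD img (y * ss + yi) []) (x * ss + xi) []) 2 0,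
         s.2.2.2 + PySem.List.pyGetD (PySem.List.pyGetD (PySem.List.pyGetD img (y * ss + yi) []) (x * ss + xi) []) 3 0)) s)
      ((0, 0, 0, 0) : Int × Int × Int × Int)
    = (pvS img ss y x 0, pvS img ss y x 1, pvS img ss y x 2, pvS img ss y x 3) := by
  have hinner : (fun (s : Int × Int × Int × Int) (xi : Int) =>
      (PySem.List.pyRange 0 ss 1).foldl (fun (s : Int × Int × Int × Int) yi =>
        (s.1 + PySem.List.pyGetD (PySem.List.pyGetD (PySem.List.pyGetD img (y * ss + yi) []) (x * ss + xi) []) 0 0,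
         s.2.1 + PySem.List.pyGetD (PySem.List.pyGetD (PySem.List.pyGetD img (y * ss + yi) []) (x * ss + xi) []) 1 0,
         s.2.2.1 + PySem.List.pyGetD (PySem.List.pyGetD (PySem.List.pyGetD img (y * ss + yi) []) (x * ss + xi) []) 2 0,
         s.2.2.2 + PySem.List.pyGetD (PySem.List.pyGetD (PySem.List.pyGetD img (y * ss + yi) []) (x * ss + xi) []) 3 0)) s)
      = (fun (s : Int × Int × Int × Int) (xi : Int) =>
        (s.1 + ((PySem.List.pyRange 0 ss 1).map (fun yi => pvP img (y * ss + yi) (x * ss + xi) 0)).sum,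
         s.2.1 + ((PySem.List.pyRange 0 ss 1).map (fun yi => pvP img (y * ss + yi) (x * ss + xi) 1)).sum,
         s.2.2.1 + ((PySem.List.pyRange 0 ss 1).map (fun yi => pvP img (y * ss + yi) (x * ss + xi) 2)).sum,
         s.2.2.2 + ((PySem.List.pyRange 0 ss 1).map (fun yi => pvP img (y * ss + yi) (x * ss + xi) 3)).sum)) := by
    funext s xi
    exact foldl_quad _ _ _ _ _ _
  rw [hinner, foldl_quad]
  simp [pvS]

lemma map_range_getD {α : Type} (o j : Nat) (hj : j < o) (H : Nat → α) (d : α) :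
    ((List.range o).map H).getD j d = H j := by
  rw [List.getD_eq_getElem?_getD]
  simp [hj]

lemma map_range_set {α : Type} (o j : Nat) (H : Nat → α) (W : α) :
    ((List.range o).map H).set j W = (List.range o).map (fun y => if y = j then W else H y) := by
  apply List.ext_getElem
  · simp
  · intro i h1 h2
    simp only [List.getElem_set, List.getElem_map, List.getElem_range]
    by_cases h : i = j
    · subst h; simp
    · rw [if_neg (Ne.symm h), if_neg h]

lemma inner_fold_char (o : Nat) (xk : Nat) (W : Nat → List Int) (G : Nat → List (List Int))
    (j : Nat) (hj : j ≤ o) :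
    (List.range j).foldl (fun out y => out.set y ((out.getD y []).set xk (W y)))
        ((List.range o).map G)
      = (List.range o).map (fun y => if y < j then (G y).set xk (W y) else G y) := by
  induction j with
  | zero => simp
  | succ j ih =>
    rw [List.range_succ, List.foldl_append, ih (by omega)]
    simp only [List.foldl_cons, List.foldl_nil]
    rw [map_range_getD o j (by omega), map_range_set]
    apply List.map_congr_left
    intro y hy
    by_cases h : y = j
    · subst h; simp
    · split_ifs with h1 h2 h2 <;> first | rfl | omega

lemma outer_fold_char (o : Nat) (V : Nat → Nat → List Int) (z : List Int)
    (k : Nat) (hk : k ≤ o) :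
    (List.range k).foldl (fun out x =>
        (List.range o).foldl (fun out y => out.set y ((out.getD y []).set x (V y x))) out)
        ((List.range o).map (fun _ => (List.range o).map (fun _ => z)))
      = (List.range o).map (fun y => (List.range o).map (fun x => if x < k then V y x else z)) := by
  induction k with
  | zero => simp
  | succ k ih =>
    rw [List.range_succ, List.foldl_append, ih (by omega)]
    simp only [List.foldl_cons, List.foldl_nil]
    rw [inner_fold_char o k (fun y => V y k) _ o le_rfl]
    apply List.map_congr_left
    intro y hy
    rw [if_pos (List.mem_range.mp hy), map_range_set]
    apply List.map_congr_left
    intro x hx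
    by_cases h : x = k
    · subst h; simp
    · split_ifs with h1 h2 h2 <;> first | rfl | omega

lemma A_char (img : List (List (List Int))) (outsize ss : Int) :
    supersample img outsize ss
      = List.map (fun y : Nat =>
          List.map (fun x : Nat => pvVal img ss (y : Int) (x : Int)) (List.range outsize.toNat))
        (List.range outsize.toNat) := by
  simp only [supersample]
  simp only [A_cell]
  simp only [pyR, List.foldl_map, List.map_map, Function.comp_def, Int.toNat_natCast]
  rw [outer_fold_char outsize.toNat
    (fun y x => [PySem.Int.floordiv (pvS img ss (y : Int) (x : Int) 0) (ss * ss),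
                 PySem.Int.floordiv (pvS img ss (y : Int) (x : Int) 1) (ss * ss),
                 PySem.Int.floordiv (pvS img ss (y : Int) (x : Int) 2) (ss * ss),
                 PySem.Int.floordiv (pvS img ss (y : Int) (x : Int) 3) (ss * ss)])
    [0, 0, 0, 0] outsize.toNat le_rfl]
  apply List.map_congr_left
  intro y hy
  apply List.map_congr_left
  intro x hx
  rw [if_pos (List.mem_range.mp hx), pvVal_eq_list]

lemma B_cell (img : List (List (List Int))) (outsize ss y x : Int)
    (hx0 : 0 ≤ x) (hx : x < outsize) :
    (PySem.List.pyRange 0 4 1).map (fun c =>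
      PySem.Int.floordiv
        ((PySem.List.pyRange 0 ss 1).foldl (fun s xi =>
          s + PySem.List.pyGetD (PySem.List.pyGetD
              ((PySem.List.pyRange 0 (outsize * ss) 1).map (fun xx =>
                (PySem.List.pyRange 0 4 1).map (fun c2 =>
                  (PySem.List.pyRange 0 ss 1).foldl (fun s2 yi =>
                    s2 + PySem.List.pyGetD
                      (PySem.List.pyGetD (PySem.List.pyGetD img (y * ss + yi) []) xx []) c2 0) 0)))
              (x * ss + xi) []) c 0) 0)
        (ss * ss))
    = pvVal img ss y x := by
  rw [pvVal]
  apply List.map_congr_left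
  intro c hc
  obtain ⟨hc0, hc4⟩ := PySem.List.mem_pyRange_one.mp hc
  congr 1
  rw [PySem.List.foldl_add, zero_add, pvS]
  apply congrArg List.sum
  apply List.map_congr_left
  intro xi hxi
  obtain ⟨hxi0, hxis⟩ := PySem.List.mem_pyRange_one.mp hxi
  have hss : 0 < ss := lt_of_le_of_lt hxi0 hxis
  have hidx0 : 0 ≤ x * ss + xi := add_nonneg (mul_nonneg hx0 hss.le) hxi0
  have hmul : (x + 1) * ss ≤ outsize * ss :=
    mul_le_mul_of_nonneg_right (by omega) hss.le
  have hidx : x * ss + xi < outsize * ss := by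
    have : (x + 1) * ss = x * ss + ss := by ring
    omega
  rw [PySem.List.pyGetD_map_pyRange_of_nonneg _ _ _ _ hidx0 hidx]
  rw [PySem.List.pyGetD_map_pyRange_of_nonneg _ _ _ _ hc0 hc4]
  rw [PySem.List.foldl_add, zero_add]
  rfl

lemma B_char (img : List (List (List Int))) (outsize ss : Int) :
    supersample_alt img outsize ss
      = List.map (fun y : Nat =>
          List.map (fun x : Nat => pvVal img ss (y : Int) (x : Int)) (List.range outsize.toNat))
        (List.range outsize.toNat) := by
  simp only [supersample_alt, PySem.List.foldl_append_singleton_eq_map, List.nil_append]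
  rw [pyR outsize]
  simp only [List.map_map, Function.comp_def]
  apply List.map_congr_left
  intro y hy
  apply List.map_congr_left
  intro x hx
  have hx' : (0 : Int) ≤ (x : Int) ∧ (x : Int) < outsize := by
    have := List.mem_range.mp hx; omega
  exact B_cell img outsize ss _ _ hx'.1 hx'.2

-- ===== VERDICT (by name: the statement is the Claim_ definition above) =====
theorem supersample_spec : Claim_equal_supersample := by
  intro img outsize ss_rate _hdom _hpre
  unfold Spec_supersample
  rw [A_char, B_char]
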